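-- pv_equiv track=rewrite | github.com/bautrey/linkedin-ingestion | scripts/test_performance_report.py | _extract_collected_count
-- ===== SOURCE A (Python) =====
-- def _extract_collected_count(output: str) -> int:
--     """Extract collected test count from pytest output."""
--     for line in output.split('\n'):
--         if "collected" in line:
--             try:
--                 parts = line.split()
--                 for i, part in enumerate(parts):
--                     if "collected" in part and i > 0:
--                         return int(parts[i-1])
--             except (ValueError, IndexError):
--                 pass
--     return 0
-- ===== SOURCE B (Python) =====
-- def _to_int(tok):
--     try:
--         return int(tok)
--     except ValueError:
--         return None
--
--
-- def _extract_collected_count(output: str) -> int: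
--     """Extract collected test count from pytest output."""
--     # Stage 1: collect, per collected-bearing line, the token preceding the
--     # first 'collected'-containing token at a positive index (one candidate per line).
--     cands = []
--     for line in output.split('\n'):
--         if "collected" in line:
--             parts = line.split()
--             hit = next((k for k in range(1, len(parts)) if "collected" in parts[k]), None)
--             if hit is not None:
--                 cands.append(parts[hit - 1])
--     # Stage 2: first candidate that parses as an int wins.
--     for n in map(_to_int, cands):
--         if n is not None:
--             return n
--     return 0
-- ===== Notes on version B (the rewrite author's own statement) =====
-- stated objective: alternative
-- what changed: Replaces A's nested early-return loop (enumerate with i>0 test and try/except around the whole inner loop) by a two-stage pipeline: a first pass materialises one candidate token per collected-bearing line (the predecessor of the first positive-index 'collected' token, found by an index search over range(1,len)), and a second pass returns the first candidate that parses as an int.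
import Mathlib
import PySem

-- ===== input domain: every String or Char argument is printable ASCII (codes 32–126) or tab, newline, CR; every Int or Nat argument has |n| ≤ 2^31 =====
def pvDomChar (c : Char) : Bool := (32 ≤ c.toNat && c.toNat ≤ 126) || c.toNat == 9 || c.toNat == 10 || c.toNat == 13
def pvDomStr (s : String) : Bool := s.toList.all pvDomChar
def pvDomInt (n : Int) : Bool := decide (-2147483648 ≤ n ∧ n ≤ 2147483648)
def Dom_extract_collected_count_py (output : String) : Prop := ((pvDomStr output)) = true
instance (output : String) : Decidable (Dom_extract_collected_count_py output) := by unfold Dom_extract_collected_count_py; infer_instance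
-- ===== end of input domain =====

-- B replaces A's nested early-return loop by a two-stage pipeline (candidate list, then first parse); same cost, alternative structure.

-- ===== PORT A =====
-- inner 'for i, part in enumerate(parts): if "collected" in part and i > 0: return int(parts[i-1])'
-- wrapped in try/except (ValueError, IndexError): some v = return v, none = fall through to next line
def pvA_inner (parts : List String) : List (Int × String) → Option Int
  | [] => none
  | (i, part) :: rest =>
    if PySem.Str.isIn "collected" part = true ∧ 0 < i then
      PySem.Int.ofStr? (PySem.List.pyGetD parts (i - 1) "")
    else pvA_inner parts rest

-- outer 'for line in output.split('\n')'
def pvA_lines : List String → Int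
  | [] => 0
  | line :: rest =>
    if PySem.Str.isIn "collected" line = true then
      match pvA_inner (PySem.Str.split₀ line) (PySem.List.enumerate (PySem.Str.split₀ line) 0) with
      | some v => v
      | none => pvA_lines rest
    else pvA_lines rest

def extract_collected_count_py (output : String) : Int :=
  pvA_lines ((PySem.Str.split? output "\n").getD [])

-- ===== PORT B =====
-- 'next((k for k in range(1, len(parts)) if "collected" in parts[k]), None)':
-- the index scan over parts[1:], carrying the current index k (starting at 1); exact
def pvB_hit : List String → Int → Option Int
  | [], _ => none
  | tok :: rest, k =>
    if PySem.Str.isIn "collected" tok = true then some k else pvB_hit rest (k + 1)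

-- stage 1: one candidate token per collected-bearing line ('cands.append(parts[hit-1])')
def pvB_cands : List String → List String
  | [] => []
  | line :: rest =>
    if PySem.Str.isIn "collected" line = true then
      match pvB_hit ((PySem.Str.split₀ line).drop 1) 1 with
      | some k => PySem.List.pyGetD (PySem.Str.split₀ line) (k - 1) "" :: pvB_cands rest
      | none => pvB_cands rest
    else pvB_cands rest

-- stage 2: 'for n in map(_to_int, cands): if n is not None: return n' ; '_to_int' = ofStr?
def pvB_first : List String → Int
  | [] => 0
  | c :: rest =>
    match PySem.Int.ofStr? c with
    | some n => n
    | none => pvB_first rest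

def extract_collected_count_py_alt (output : String) : Int :=
  pvB_first (pvB_cands ((PySem.Str.split? output "\n").getD []))

-- ===== PRECONDITION & SPEC =====
def Spec_extract_collected_count_py (output : String) (out : Int) : Prop := out = extract_collected_count_py_alt output
instance (output : String) (out : Int) : Decidable (Spec_extract_collected_count_py output out) := by unfold Spec_extract_collected_count_py; infer_instance

-- ===== CLAIM (what is proved, stated in full; the proofs are below) =====
def Claim_equal_extract_collected_count_py : Prop := ∀ (output : String), Dom_extract_collected_count_py output → Spec_extract_collected_count_py output (extract_collected_count_py output)

-- ===== LEMMAS AND PROOFS =====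

-- A's enumerate scan from index pre.length (≥ 1) over tail, inside parts = pre ++ tail,
-- equals B's index scan pvB_hit over tail followed by the single candidate parse.
lemma pv_aux (tail : List String) : ∀ (pre : List String), 1 ≤ pre.length →
    pvA_inner (pre ++ tail) (PySem.List.enumerate tail (pre.length : Int)) =
    (pvB_hit tail (pre.length : Int)).bind
      (fun k => PySem.Int.ofStr? (PySem.List.pyGetD (pre ++ tail) (k - 1) "")) := by
  induction tail with
  | nil =>
    intro pre _
    simp [PySem.List.enumerate_nil, pvA_inner, pvB_hit]
  | cons t ts ih =>
    intro pre hpre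
    rw [PySem.List.enumerate_cons]
    show pvA_inner (pre ++ t :: ts) _ = _
    unfold pvA_inner pvB_hit
    by_cases h : PySem.Str.isIn "collected" t = true
    · rw [if_pos ⟨h, by exact_mod_cast hpre⟩, if_pos h]
      rfl
    · rw [if_neg (by tauto), if_neg h]
      have := ih (pre ++ [t]) (by simp)
      simpa [List.append_assoc, add_comm] using this

-- per line: A's inner result = B's hit-then-parse on that line's parts
lemma pv_inner_eq (parts : List String) :
    pvA_inner parts (PySem.List.enumerate parts 0) =
    (pvB_hit (parts.drop 1) 1).bind
      (fun k => PySem.Int.ofStr? (PySem.List.pyGetD parts (k - 1) "")) := by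
  cases parts with
  | nil => simp [PySem.List.enumerate_nil, pvA_inner, pvB_hit]
  | cons a suf =>
    rw [PySem.List.enumerate_cons]
    show pvA_inner (a :: suf) _ = _
    unfold pvA_inner
    rw [if_neg (by simp)]
    have := pv_aux suf [a] (by simp)
    simpa using this

lemma pv_lines_eq : ∀ ls : List String, pvA_lines ls = pvB_first (pvB_cands ls) := by
  intro ls
  induction ls with
  | nil => rfl
  | cons line rest ih =>
    unfold pvA_lines pvB_cands
    by_cases h : PySem.Str.isIn "collected" line = true
    · rw [if_pos h, if_pos h, pv_inner_eq, List.drop_one]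
      cases hh : pvB_hit (PySem.Str.split₀ line).tail 1 with
      | none => simpa [hh] using ih
      | some k =>
        simp only [Option.bind_some]
        cases hp : PySem.Int.ofStr? (PySem.List.pyGetD (PySem.Str.split₀ line) (k - 1) "") with
        | none => simp [pvB_first, hp, ih]
        | some v => simp [pvB_first, hp]
    · rw [if_neg h, if_neg h]; exact ih

-- ===== VERDICT (by name: the statement is the Claim_ definition above) =====
theorem extract_collected_count_py_spec : Claim_equal_extract_collected_count_py := by
  intro output _
  unfold Spec_extract_collected_count_py extract_collected_count_py extract_collected_count_py_alt
  exact pv_lines_eq _
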